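-- pv_equiv track=rewrite | github.com/JunOnJuly/BaekJoon | 백준/Silver/25192. 인사성 밝은 곰곰이/인사성 밝은 곰곰이.py | solution
-- ===== SOURCE A (Python) =====
-- from collections import defaultdict
--
-- def solution(N, data_list):
--     # enter 횟수
--     enter = 0
--     # 채팅 기록 dict
--     chat_log_dict = defaultdict(int)
--     # 임시 기록
--     temp_count_set = set()
--     # 채팅 기록을 순회하며 카운트
--     for idx, data in enumerate(data_list):
--         # enter 을 기점으로 기록 카운트 후 기록을 초기화
--         if data == 'ENTER':
--             for name in list(temp_count_set):
--                 chat_log_dict[name] += 1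
--             temp_count_set = set()
--         # 일반적인 경우 그냥 데이터 추가
--         else:
--             temp_count_set.add(data)
--     # 순회가 끝나면 기록 카운트
--     for name in list(temp_count_set):
--         chat_log_dict[name] += 1
--
--
--     return sum(chat_log_dict.values())
-- ===== SOURCE B (Python) =====
-- def _repeats_before_enter(x, rest):
--     # does x occur again in rest before the next 'ENTER' (or the end)?
--     for y in rest:
--         if y == 'ENTER':
--             return False
--         if y == x:
--             return True
--     return False
--
--
-- def solution(N, data_list):
--     # A name contributes 1 per block it chats in; count, for each position,
--     # whether it is the LAST occurrence of that name within its ENTER-block.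
--     total = 0
--     for i, x in enumerate(data_list):
--         if x != 'ENTER' and not _repeats_before_enter(x, data_list[i + 1:]):
--             total += 1
--     return total
-- ===== Notes on version B (the rewrite author's own statement) =====
-- stated objective: alternative
-- what changed: Replaces the set+dict distinct-per-block counting entirely: B keeps no set and no dict, it counts each position that is the last occurrence of its name within its ENTER-delimited block, scanning forward from each position (distinct-per-block = number of last occurrences per block).
import Mathlib
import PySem

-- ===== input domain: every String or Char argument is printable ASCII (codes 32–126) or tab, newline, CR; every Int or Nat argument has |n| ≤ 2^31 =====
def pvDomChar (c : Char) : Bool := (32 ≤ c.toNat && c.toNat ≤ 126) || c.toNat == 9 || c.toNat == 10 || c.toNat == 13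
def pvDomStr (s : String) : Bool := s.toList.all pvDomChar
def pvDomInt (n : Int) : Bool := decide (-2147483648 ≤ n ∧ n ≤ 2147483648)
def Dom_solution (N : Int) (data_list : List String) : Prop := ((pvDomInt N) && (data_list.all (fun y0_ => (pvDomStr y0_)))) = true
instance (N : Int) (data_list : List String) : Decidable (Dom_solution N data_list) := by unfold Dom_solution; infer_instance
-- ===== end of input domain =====

-- B abandons A's dict+set distinct-per-block counting: it counts, by a forward scan from
-- each position, the positions that are the LAST occurrence of their name within their
-- ENTER-delimited block (objective: alternative; no speed claim).


-- ===== PORT A =====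
-- state: (chat_log_dict, temp_count_set); the loop runs over enumerate(data_list) (idx unused);
-- the final answer sum(chat_log_dict.values()) does not depend on any iteration order over the set
def solution (N : Int) (data_list : List String) : Int :=
  let st := (PySem.List.enumerate data_list).foldl
    (fun (st : PySem.Dict String Int × PySem.Set String) p =>
      if p.2 == "ENTER" then
        (st.2.foldl (fun d name => d.modify name 0 (· + 1)) st.1, PySem.Set.empty)
      else
        (st.1, PySem.Set.add st.2 p.2))
    (PySem.Dict.empty, PySem.Set.empty)
  let d := st.2.foldl (fun d name => d.modify name 0 (· + 1)) st.1
  (PySem.Dict.values d).sum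

-- ===== PORT B =====
-- helper _repeats_before_enter(x, rest): scan rest, stop at 'ENTER' (False) or x (True)
def repeatsBeforeEnter (x : String) : List String → Bool
  | [] => false
  | y :: rest => if y == "ENTER" then false else if y == x then true else repeatsBeforeEnter x rest

-- for i, x in enumerate(data_list): count x if x != 'ENTER' and not repeated in data_list[i+1:]
def solution_alt (N : Int) (data_list : List String) : Int :=
  (PySem.List.enumerate data_list).foldl
    (fun total p =>
      if p.2 != "ENTER" && !repeatsBeforeEnter p.2 (PySem.List.slice data_list (some (p.1 + 1)) none) then
        total + 1
      else total) 0

-- ===== PRECONDITION & SPEC =====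
def Spec_solution (N : Int) (data_list : List String) (out : Int) : Prop := out = solution_alt N data_list
instance (N : Int) (data_list : List String) (out : Int) : Decidable (Spec_solution N data_list out) := by unfold Spec_solution; infer_instance

-- ===== CLAIM (what is proved, stated in full; the proofs are below) =====
def Claim_equal_solution : Prop := ∀ (N : Int) (data_list : List String), Dom_solution N data_list → Spec_solution N data_list (solution N data_list)

-- ===== LEMMAS AND PROOFS =====

-- structural version of B's count (proof-side only)
def altCnt : List String → Int
  | [] => 0
  | x :: rest => (if x ≠ "ENTER" ∧ repeatsBeforeEnter x rest = false then 1 else 0) + altCnt rest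

-- names of s (an A-side temp set) still uncounted by B's scan of the remaining list L
def keptCnt (s : List String) (L : List String) : Int :=
  ((s.filter (fun y => !repeatsBeforeEnter y L)).length : Int)

theorem modify_items_cons_ne (p : String × Int) (rest : List (String × Int)) (x : String)
    (f : Int → Int) (hk : p.1 ≠ x) :
    ((PySem.Dict.mk (p :: rest)).modify x 0 f).items
      = p :: ((PySem.Dict.mk rest).modify x 0 f).items := by
  simp only [PySem.Dict.modify, PySem.Dict.insert, PySem.Dict.contains, PySem.Dict.getD,
    PySem.Dict.get?, List.any_cons, List.find?_cons]
  have hb : (p.1 == x) = false := by simp [hk]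
  by_cases h : (rest.any fun q => q.1 == x) = true <;> simp [hb, h, hk]

theorem modify_items_cons_eq (p : String × Int) (rest : List (String × Int)) (x : String)
    (f : Int → Int) (hk : p.1 = x) (hrest : ∀ q ∈ rest, q.1 ≠ x) :
    ((PySem.Dict.mk (p :: rest)).modify x 0 f).items = (x, f p.2) :: rest := by
  have hb : (p.1 == x) = true := by simp [hk]
  have hmap : rest.map (fun q => if q.1 = x then (x, f p.2) else q) = rest := by
    calc rest.map (fun q => if q.1 = x then (x, f p.2) else q)
        = rest.map id := List.map_congr_left (fun q hq => by simp [hrest q hq])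
      _ = rest := List.map_id rest
  simp only [PySem.Dict.modify, PySem.Dict.insert, PySem.Dict.contains, PySem.Dict.getD,
    PySem.Dict.get?, List.any_cons, List.find?_cons, hb]
  simp [hk, hmap]

theorem sum_values_modify_one (l : List (String × Int))
    (hnd : (l.map (·.1)).Nodup) (x : String) :
    (((PySem.Dict.mk l).modify x 0 (· + 1)).values).sum = (l.map (·.2)).sum + 1 := by
  induction l with
  | nil =>
    simp [PySem.Dict.modify, PySem.Dict.insert, PySem.Dict.contains, PySem.Dict.getD,
      PySem.Dict.get?, PySem.Dict.values]
  | cons p rest ih =>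
    simp only [List.map_cons, List.nodup_cons, List.mem_map] at hnd
    by_cases hk : p.1 = x
    · have hrest : ∀ q ∈ rest, q.1 ≠ x := by
        intro q hq hqx
        exact hnd.1 ⟨q, hq, by rw [hqx, hk]⟩
      simp [PySem.Dict.values, modify_items_cons_eq p rest x _ hk hrest]
      ring
    · have := ih (by simpa using hnd.2)
      simp only [PySem.Dict.values] at this ⊢
      rw [modify_items_cons_ne p rest x _ hk]
      simp [this]
      ring

theorem sum_values_flush (s : List String) :
    ∀ (d : PySem.Dict String Int), d.keys.Nodup →
    ((s.foldl (fun d name => d.modify name 0 (· + 1)) d).values).sum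
      = d.values.sum + (s.length : Int) := by
  induction s with
  | nil => intro d _; simp
  | cons x s ih =>
    intro d hnd
    have hstep : ((d.modify x 0 (· + 1)).values).sum = d.values.sum + 1 := by
      have := sum_values_modify_one d.items (by simpa [PySem.Dict.keys] using hnd) x
      simpa [PySem.Dict.values] using this
    have hnd' : (d.modify x 0 (· + 1)).keys.Nodup := by
      have := PySem.Dict.nodup_keys_foldl_modify_key [x] (fun y => y) 0
        (fun _ _ => (· + 1)) d hnd
      simpa using this
    simp only [List.foldl_cons]
    rw [ih _ hnd', hstep]
    simp
    ring

-- splitting a nodup list's filter count at a member x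
theorem filter_length_split (x : String) (g : String → Bool) :
    ∀ (s : List String), s.Nodup → x ∈ s →
    ((s.filter g).length : Int)
      = ((s.filter (fun y => !(x == y) && g y)).length : Int) + (if g x then 1 else 0) := by
  intro s
  induction s with
  | nil => intro _ hx; cases hx
  | cons a t ih =>
    intro hnd hx
    rcases List.nodup_cons.mp hnd with ⟨ha, hndt⟩
    by_cases hax : a = x
    · subst hax
      have hfix : t.filter (fun y => !(a == y) && g y) = t.filter g := by
        apply List.filter_congr
        intro y hy
        have : (a == y) = false := by
          simp only [beq_eq_false_iff_ne]; intro h; exact ha (h ▸ hy)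
        simp [this]
      by_cases hg : g a = true <;> simp [hg, hfix]
    · have hxt : x ∈ t := by cases hx with
        | head => exact absurd rfl hax
        | tail _ h => exact h
      have hne : (x == a) = false := by
        simp only [beq_eq_false_iff_ne]; exact fun h => hax h.symm
      have := ih hndt hxt
      by_cases hg : g a = true <;> simp [hg, hne, this] <;> ring

-- the key bookkeeping step: adding x to the temp set vs. B scanning over x
theorem keptCnt_add (s : List String) (hnd : s.Nodup) (x : String) (hx : x ≠ "ENTER")
    (rest : List String) :
    keptCnt (PySem.Set.add s x) rest
      = keptCnt s (x :: rest) + (if repeatsBeforeEnter x rest = false then 1 else 0) := by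
  have hxE : (x == "ENTER") = false := by simp [hx]
  have hcons : s.filter (fun y => !repeatsBeforeEnter y (x :: rest))
      = s.filter (fun y => !(x == y) && !repeatsBeforeEnter y rest) := by
    apply List.filter_congr
    intro y _
    show (!repeatsBeforeEnter y (x :: rest)) = _
    simp only [repeatsBeforeEnter, hxE]
    by_cases h : (x == y) = true <;> simp [h]
  by_cases hmem : x ∈ s
  · rw [PySem.Set.add_of_mem hmem]
    have := filter_length_split x (fun y => !repeatsBeforeEnter y rest) s hnd hmem
    simp only [keptCnt, hcons]
    rw [this]
    by_cases h : repeatsBeforeEnter x rest = false <;> simp [h]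
  · rw [PySem.Set.add_of_not_mem hmem]
    have hfix : s.filter (fun y => !(x == y) && !repeatsBeforeEnter y rest)
        = s.filter (fun y => !repeatsBeforeEnter y rest) := by
      apply List.filter_congr
      intro y hy
      have : (x == y) = false := by
        simp only [beq_eq_false_iff_ne]; intro h; exact hmem (h ▸ hy)
      simp [this]
    simp only [keptCnt, hcons, hfix, List.filter_append]
    by_cases h : repeatsBeforeEnter x rest = false <;> simp [h]

-- invariant of A's main loop against B's structural count
theorem A_fold_inv : ∀ (L : List String) (d : PySem.Dict String Int) (s : PySem.Set String),
    d.keys.Nodup → s.Nodup →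
    (let st := L.foldl
        (fun (st : PySem.Dict String Int × PySem.Set String) data =>
          if data == "ENTER" then
            (st.2.foldl (fun d name => d.modify name 0 (· + 1)) st.1, PySem.Set.empty)
          else (st.1, PySem.Set.add st.2 data)) (d, s)
     ((st.2.foldl (fun d name => d.modify name 0 (· + 1)) st.1).values).sum)
    = d.values.sum + keptCnt s L + altCnt L := by
  intro L
  induction L with
  | nil =>
    intro d s hd hs
    have hall : s.filter (fun y => !repeatsBeforeEnter y []) = s := by
      apply List.filter_eq_self.mpr
      intro y _; simp [repeatsBeforeEnter]
    simp only [List.foldl_nil, altCnt, keptCnt, hall]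
    rw [sum_values_flush s d hd]
    ring
  | cons x rest ih =>
    intro d s hd hs
    by_cases hx : x = "ENTER"
    · subst hx
      have hd' : ((s.foldl (fun d name => d.modify name 0 (· + 1)) d)).keys.Nodup :=
        PySem.Dict.nodup_keys_foldl_modify_key s (fun y => y) 0 (fun _ _ => (· + 1)) d hd
      have hflush : ((s.foldl (fun d name => d.modify name 0 (· + 1)) d)).values.sum
          = d.values.sum + (s.length : Int) := sum_values_flush s d hd
      have hkept : keptCnt s ("ENTER" :: rest) = (s.length : Int) := by
        have hall : s.filter (fun y => !repeatsBeforeEnter y ("ENTER" :: rest)) = s := by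
          apply List.filter_eq_self.mpr
          intro y _; simp [repeatsBeforeEnter]
        simp [keptCnt, hall]
      simp only [List.foldl_cons, beq_self_eq_true, if_true]
      rw [ih _ PySem.Set.empty hd' (by simp [PySem.Set.empty])]
      rw [hflush, hkept]
      simp [altCnt, keptCnt, PySem.Set.empty, repeatsBeforeEnter]
    · have hb : (x == "ENTER") = false := by simp [hx]
      simp only [List.foldl_cons, hb, Bool.false_eq_true, if_false]
      rw [ih d (PySem.Set.add s x) hd (PySem.Set.nodup_add s x hs)]
      rw [keptCnt_add s hs x hx rest]
      have haltc : altCnt (x :: rest)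
          = (if repeatsBeforeEnter x rest = false then 1 else 0) + altCnt rest := by
        simp only [altCnt]
        by_cases h : repeatsBeforeEnter x rest = false <;> simp [h, hx]
      rw [haltc]
      ring

theorem solution_eq_altCnt (N : Int) (L : List String) :
    solution N L = altCnt L := by
  unfold solution
  have h : (PySem.List.enumerate L).foldl
      (fun (st : PySem.Dict String Int × PySem.Set String) p =>
        if p.2 == "ENTER" then
          (st.2.foldl (fun d name => d.modify name 0 (· + 1)) st.1, PySem.Set.empty)
        else (st.1, PySem.Set.add st.2 p.2)) (PySem.Dict.empty, PySem.Set.empty)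
      = L.foldl
        (fun (st : PySem.Dict String Int × PySem.Set String) data =>
          if data == "ENTER" then
            (st.2.foldl (fun d name => d.modify name 0 (· + 1)) st.1, PySem.Set.empty)
          else (st.1, PySem.Set.add st.2 data)) (PySem.Dict.empty, PySem.Set.empty) := by
    conv_rhs => rw [← PySem.List.map_snd_enumerate L 0, List.foldl_map]
  rw [h]
  have := A_fold_inv L PySem.Dict.empty PySem.Set.empty
    (by simp [PySem.Dict.keys, PySem.Dict.empty]) (by simp [PySem.Set.empty])
  simp only at this
  rw [this]
  simp [PySem.Dict.values, PySem.Dict.empty, keptCnt, PySem.Set.empty]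

-- B's index/slice loop computes the structural count
theorem alt_bridge : ∀ (L pre : List String) (t : Int),
    (PySem.List.enumerate L (pre.length : Int)).foldl
      (fun total p =>
        if p.2 != "ENTER" && !repeatsBeforeEnter p.2
            (PySem.List.slice (pre ++ L) (some (p.1 + 1)) none) then total + 1 else total) t
    = t + altCnt L := by
  intro L
  induction L with
  | nil => intro pre t; simp [PySem.List.enumerate, altCnt]

  | cons x rest ih =>
    intro pre t
    rw [PySem.List.enumerate_cons]
    simp only [List.foldl_cons]
    have hslice : PySem.List.slice (pre ++ x :: rest) (some ((pre.length : Int) + 1)) none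
        = rest := by
      have hc : ((pre.length : Int) + 1) = ((pre.length + 1 : Nat) : Int) := by push_cast; ring
      rw [hc, PySem.List.slice_from_natCast]
      have : pre ++ x :: rest = (pre ++ [x]) ++ rest := by simp
      rw [this]
      have hlen : pre.length + 1 = (pre ++ [x]).length := by simp
      rw [hlen, List.drop_left]
    rw [hslice]
    have hrec := ih (pre ++ [x])
      (if (x != "ENTER") && !repeatsBeforeEnter x rest then t + 1 else t)
    have hlen2 : (((pre ++ [x]).length : Nat) : Int) = (pre.length : Int) + 1 := by
      simp
    rw [hlen2] at hrec
    have happ2 : (pre ++ [x]) ++ rest = pre ++ x :: rest := by simp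
    rw [happ2] at hrec
    rw [hrec]
    have haltc : altCnt (x :: rest)
        = (if x ≠ "ENTER" ∧ repeatsBeforeEnter x rest = false then 1 else 0) + altCnt rest := rfl
    rw [haltc]
    by_cases hx : x = "ENTER"
    · simp [hx]
    · by_cases hr : repeatsBeforeEnter x rest = false <;> simp [hx, hr] <;> ring

theorem solution_alt_eq_altCnt (N : Int) (L : List String) :
    solution_alt N L = altCnt L := by
  unfold solution_alt
  have := alt_bridge L [] 0
  simpa using this

-- ===== VERDICT (by name: the statement is the Claim_ definition above) =====
theorem solution_spec : Claim_equal_solution := by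
  intro N data_list _
  show solution N data_list = solution_alt N data_list
  rw [solution_eq_altCnt, solution_alt_eq_altCnt]
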